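-- pv_equiv track=rewrite | github.com/dMedinaO/hydrophobinsIdentification | scripts/filterSeqBySize.py | prefilterNumberCys
-- ===== SOURCE A (Python) =====
-- def prefilterNumberCys(sequence):
--
--     cont=0
--     for i in range(len(sequence)-1):
--         if sequence[i] == 'C' and sequence[i+1] == 'C':
--             cont+=1
--     if cont>=2:
--         return 0#cumple con la cantidad minima
--     else:
--         return 1#no cumple con la cantidad minima
-- ===== SOURCE B (Python) =====
-- def prefilterNumberCys(sequence):
--     # run-based scan: a maximal run of L identical chars contributes L-1 adjacent
--     # equal pairs; sum those contributions for runs of 'C' only.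
--     pairs = 0
--     i = 0
--     n = len(sequence)
--     while i < n:
--         j = i
--         while j < n and sequence[j] == sequence[i]:
--             j += 1
--         if sequence[i] == 'C':
--             pairs += j - i - 1
--         i = j
--     return 0 if pairs >= 2 else 1
-- ===== Notes on version B (the rewrite author's own statement) =====
-- stated objective: alternative
-- what changed: Replaces the per-index scan over all adjacent positions with a two-pointer walk over maximal runs of identical characters, adding run_length-1 for each run of 'C'.
import Mathlib
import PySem

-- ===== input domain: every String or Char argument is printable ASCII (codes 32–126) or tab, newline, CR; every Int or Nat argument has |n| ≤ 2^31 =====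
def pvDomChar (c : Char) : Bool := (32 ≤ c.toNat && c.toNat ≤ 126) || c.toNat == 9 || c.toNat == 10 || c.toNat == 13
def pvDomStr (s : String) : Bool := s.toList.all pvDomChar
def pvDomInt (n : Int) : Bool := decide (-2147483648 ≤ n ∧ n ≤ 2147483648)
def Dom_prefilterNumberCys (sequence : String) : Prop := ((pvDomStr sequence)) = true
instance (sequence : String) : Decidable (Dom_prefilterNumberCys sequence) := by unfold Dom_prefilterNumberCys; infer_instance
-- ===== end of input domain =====

-- B replaces A's per-index scan of adjacent positions by a two-pointer walk over
-- maximal runs of identical characters (each run of L 'C's contributes L-1 pairs).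


-- ===== PORT A =====
def prefilterNumberCys (sequence : String) : Int :=
  let cont : Int :=
    (PySem.List.pyRange 0 (PySem.Str.len sequence - 1) 1).foldl
      (fun cont i =>
        if PySem.Str.pyGet? sequence i = some 'C' ∧
           PySem.Str.pyGet? sequence (i + 1) = some 'C'
        then cont + 1 else cont) 0
  if cont ≥ 2 then 0 else 1

-- ===== PORT B =====
-- The inner 'while j < n and sequence[j] == sequence[i]' run scan is takeWhile/dropWhile
-- on the characters after the run head; the contribution j - i - 1 is the takeWhile length.
def pvAltRuns : List Char → Int
  | [] => 0
  | a :: t =>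
    (if a = 'C' then ((t.takeWhile (· == a)).length : Int) else 0) +
      pvAltRuns (t.dropWhile (· == a))
termination_by l => l.length
decreasing_by
  simpa using Nat.lt_succ_of_le (List.length_dropWhile_le _ t)

def prefilterNumberCys_alt (sequence : String) : Int :=
  if pvAltRuns sequence.toList ≥ 2 then 0 else 1

-- ===== PRECONDITION & SPEC =====
def Spec_prefilterNumberCys (sequence : String) (out : Int) : Prop := out = prefilterNumberCys_alt sequence
instance (sequence : String) (out : Int) : Decidable (Spec_prefilterNumberCys sequence out) := by unfold Spec_prefilterNumberCys; infer_instance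

-- ===== CLAIM (what is proved, stated in full; the proofs are below) =====
def Claim_equal_prefilterNumberCys : Prop := ∀ (sequence : String), Dom_prefilterNumberCys sequence → Spec_prefilterNumberCys sequence (prefilterNumberCys sequence)

-- ===== LEMMAS AND PROOFS =====

-- the common characterisation: number of adjacent positions holding 'C','C'
def ccPairs : List Char → Int
  | a :: b :: t => (if a = 'C' ∧ b = 'C' then 1 else 0) + ccPairs (b :: t)
  | _ => 0

lemma ccPairs_nil : ccPairs [] = 0 := rfl
lemma ccPairs_single (a : Char) : ccPairs [a] = 0 := rfl
lemma ccPairs_cc (a b : Char) (t : List Char) :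
    ccPairs (a :: b :: t) = (if a = 'C' ∧ b = 'C' then 1 else 0) + ccPairs (b :: t) := rfl

-- A's loop body, over the char list
def pvStepA (l : List Char) (cont : Int) (i : Int) : Int :=
  if PySem.List.pyGet? l i = some 'C' ∧ PySem.List.pyGet? l (i + 1) = some 'C'
  then cont + 1 else cont

lemma pvStepA_shift (l : List Char) (xs : List Int) (c : Int) :
    xs.foldl (pvStepA l) c = c + xs.foldl (pvStepA l) 0 := by
  induction xs generalizing c with
  | nil => simp
  | cons x xs ih =>
    simp only [List.foldl_cons]
    rw [ih (pvStepA l c x), ih (pvStepA l 0 x)]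
    unfold pvStepA; split <;> ring

lemma pvStepA_cons (a : Char) (l : List Char) (xs : List Nat) (c : Int) :
    (xs.map (fun (k : Nat) => ((k : Int) + 1))).foldl (pvStepA (a :: l)) c
      = (xs.map (fun (k : Nat) => (k : Int))).foldl (pvStepA l) c := by
  induction xs generalizing c with
  | nil => rfl
  | cons k ks ih =>
    simp only [List.map_cons, List.foldl_cons]
    have h1 : pvStepA (a :: l) c ((k : Int) + 1) = pvStepA l c (k : Int) := by
      unfold pvStepA
      have e2 : ((k : Int) + 1 + 1) = ((k + 1 : Nat) : Int) + 1 := by push_cast; ring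
      rw [PySem.List.pyGet?_cons_succ, e2, PySem.List.pyGet?_cons_succ]
      push_cast
      rfl
    rw [h1, ih]

lemma pvLoopA_eq_ccPairs (l : List Char) :
    ((List.range (l.length - 1)).map (fun (k : Nat) => (k : Int))).foldl (pvStepA l) 0
      = ccPairs l := by
  induction l with
  | nil => simp [ccPairs_nil]
  | cons a t ih =>
    cases t with
    | nil => simp [ccPairs_single]
    | cons b t' =>
      have hlen : (a :: b :: t').length - 1 = t'.length + 1 := by simp
      rw [hlen, List.range_succ_eq_map, List.map_cons, List.foldl_cons]
      have hmap : (List.map Nat.succ (List.range t'.length)).map (fun (k : Nat) => (k : Int))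
          = (List.range t'.length).map (fun (k : Nat) => ((k : Int) + 1)) := by
        rw [List.map_map]
        apply List.map_congr_left
        intro k _
        simp
      rw [hmap, pvStepA_cons, pvStepA_shift]
      have hstep : pvStepA (a :: b :: t') 0 ((0 : Nat) : Int)
          = if a = 'C' ∧ b = 'C' then 1 else 0 := by
        unfold pvStepA
        rw [PySem.List.pyGet?_cons_succ]
        simp
      have hlen' : (b :: t').length - 1 = t'.length := by simp
      rw [hstep]
      rw [hlen'] at ih
      rw [ih, ccPairs_cc]

lemma ccPairs_cons_run (a : Char) (run rest : List Char)
    (hrun : ∀ x ∈ run, x = a) (hrest : ∀ x, rest.head? = some x → x ≠ a) :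
    ccPairs (a :: (run ++ rest)) = (if a = 'C' then (run.length : Int) else 0) + ccPairs rest := by
  induction run with
  | nil =>
    cases rest with
    | nil => simp [ccPairs_single, ccPairs_nil]
    | cons r rt =>
      have hra : r ≠ a := hrest r rfl
      have hno : ¬(a = 'C' ∧ r = 'C') := fun ⟨h1, h2⟩ => hra (h2.trans h1.symm)
      simp only [List.nil_append, ccPairs_cc, hno, if_false, List.length_nil]
      simp
  | cons y ys ih =>
    have hy : y = a := hrun y (List.mem_cons_self)
    subst hy
    have ih' := ih (fun x hx => hrun x (List.mem_cons_of_mem _ hx))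
    show ccPairs (y :: y :: (ys ++ rest)) = _
    rw [ccPairs_cc]
    rw [ih']
    by_cases hc : y = 'C'
    · simp only [hc, and_self, if_true, List.length_cons]
      push_cast
      ring
    · have hno : ¬('C' = 'C' ∧ y = 'C') := fun h => hc h.2
      simp [hc]

lemma pvAltRuns_eq_ccPairs (l : List Char) : pvAltRuns l = ccPairs l := by
  fun_induction pvAltRuns l with
  | case1 => simp [ccPairs_nil]
  | case2 a t ih =>
    rw [ih]
    conv_rhs => rw [show a :: t = a :: (t.takeWhile (· == a) ++ t.dropWhile (· == a)) by
      rw [List.takeWhile_append_dropWhile]]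
    rw [ccPairs_cons_run a _ _
      (fun x hx => by simpa using List.mem_takeWhile_imp hx)
      (fun x hx hxa => by
        have hne : t.dropWhile (· == a) ≠ [] := by
          intro hnil; rw [hnil] at hx; simp at hx
        have hnot := List.head_dropWhile_not (fun x => x == a) hne
        rw [List.head?_eq_some_head hne] at hx
        cases hx
        simp [hxa] at hnot)]

-- ===== VERDICT (by name: the statement is the Claim_ definition above) =====
theorem prefilterNumberCys_spec : Claim_equal_prefilterNumberCys := by
  intro s _
  show _ = _
  unfold prefilterNumberCys prefilterNumberCys_alt
  have hrange : PySem.List.pyRange 0 (PySem.Str.len s - 1) 1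
      = (List.range (s.toList.length - 1)).map (fun (k : Nat) => (k : Int)) := by
    rw [PySem.List.pyRange_one]
    have h1 : (PySem.Str.len s - 1 - 0).toNat = s.toList.length - 1 := by
      simp [PySem.Str.len_eq]
    rw [h1]
    simp
  have hfun : (fun (cont i : Int) =>
      if PySem.Str.pyGet? s i = some 'C' ∧ PySem.Str.pyGet? s (i + 1) = some 'C'
      then cont + 1 else cont) = pvStepA s.toList := by
    funext c i
    unfold pvStepA
    simp [PySem.Str.pyGet?]
  simp only [hrange, hfun]
  rw [pvLoopA_eq_ccPairs, ← pvAltRuns_eq_ccPairs]
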